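-- pv_equiv track=rewrite | github.com/ngminhhhh/Traffic_agent | engine.py | build_state_str
-- ===== SOURCE A (Python) =====
-- def build_state_str(lanes):
--     we_green, sn_green, we_yellow, sn_yellow = "", "", "", ""
--
--     for lane in lanes:
--         if lane.startswith("3T2_W2C") or lane.startswith("3T2_E2C"):
--             we_green  += "g"
--             we_yellow += "y"
--             sn_green  += "r"
--             sn_yellow += "r"
--
--         else:
--             we_green  += "r"
--             we_yellow += "r"
--             sn_green  += "g"
--             sn_yellow += "y"
--
--     return {
--         "WE_green":  we_green,
--         "SN_green":  sn_green,
--         "WE_yellow": we_yellow,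
--         "SN_yellow": sn_yellow
--     }
-- ===== SOURCE B (Python) =====
-- def build_state_str(lanes):
--     # Build one intermediate classification string, then derive each output
--     # from it in separate whole-string passes.
--     flags = "".join(
--         "W" if lane.startswith("3T2_W2C") or lane.startswith("3T2_E2C") else "S"
--         for lane in lanes
--     )
--
--     def paint(w_to, s_to):
--         return "".join(w_to if f == "W" else s_to for f in flags)
--
--     return {
--         "WE_green":  paint("g", "r"),
--         "SN_green":  paint("r", "g"),
--         "WE_yellow": paint("y", "r"),
--         "SN_yellow": paint("r", "y"),
--     }
-- ===== Notes on version B (the rewrite author's own statement) =====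
-- stated objective: idiomatic
-- what changed: A fuses everything into one loop that grows four accumulator strings in lockstep; B first builds an intermediate classification string ('W'/'S' per lane) and then derives each of the four outputs by an independent whole-string transformation of it.
import Mathlib
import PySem

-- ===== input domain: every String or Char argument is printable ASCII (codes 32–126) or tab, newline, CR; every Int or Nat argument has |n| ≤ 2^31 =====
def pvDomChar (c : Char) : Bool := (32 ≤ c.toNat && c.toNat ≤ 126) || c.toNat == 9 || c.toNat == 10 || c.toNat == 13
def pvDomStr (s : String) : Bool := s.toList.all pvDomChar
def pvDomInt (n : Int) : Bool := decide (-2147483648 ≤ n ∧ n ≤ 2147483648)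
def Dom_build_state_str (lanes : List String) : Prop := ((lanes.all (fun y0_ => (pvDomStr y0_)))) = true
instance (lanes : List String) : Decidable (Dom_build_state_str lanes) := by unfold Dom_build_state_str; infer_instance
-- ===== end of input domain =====

-- B replaces A's single four-accumulator loop by an intermediate 'W'/'S' classification
-- string plus four independent whole-string transforms (objective: idiomatic decomposition).

-- ===== PORT A =====
-- one fold carrying the four accumulator strings (we_green, sn_green, we_yellow, sn_yellow)
def build_state_str (lanes : List String) : List (String × String) :=
  let r := lanes.foldl
    (fun (st : String × String × String × String) lane =>
      if PySem.Str.startswith lane "3T2_W2C" || PySem.Str.startswith lane "3T2_E2C" then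
        (st.1 ++ "g", st.2.1 ++ "r", st.2.2.1 ++ "y", st.2.2.2 ++ "r")
      else
        (st.1 ++ "r", st.2.1 ++ "g", st.2.2.1 ++ "r", st.2.2.2 ++ "y"))
    ("", "", "", "")
  [("WE_green", r.1), ("SN_green", r.2.1), ("WE_yellow", r.2.2.1), ("SN_yellow", r.2.2.2)]

-- ===== PORT B =====
-- ''.join of one-character strings is exactly the string of those characters, so each
-- join in Source B is ported as String.ofList of the mapped character list (exact);
-- Python's one-character iteration strings become Chars.
def bss_flags (lanes : List String) : List Char :=
  lanes.map (fun lane =>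
    if PySem.Str.startswith lane "3T2_W2C" || PySem.Str.startswith lane "3T2_E2C" then 'W' else 'S')

def bss_paint (flags : List Char) (w_to s_to : Char) : String :=
  String.ofList (flags.map (fun f => if f == 'W' then w_to else s_to))

def build_state_str_alt (lanes : List String) : List (String × String) :=
  let flags := bss_flags lanes
  [("WE_green",  bss_paint flags 'g' 'r'),
   ("SN_green",  bss_paint flags 'r' 'g'),
   ("WE_yellow", bss_paint flags 'y' 'r'),
   ("SN_yellow", bss_paint flags 'r' 'y')]

-- ===== PRECONDITION & SPEC =====
def Spec_build_state_str (lanes : List String) (out : List (String × String)) : Prop := out = build_state_str_alt lanes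
instance (lanes : List String) (out : List (String × String)) : Decidable (Spec_build_state_str lanes out) := by unfold Spec_build_state_str; infer_instance

-- ===== CLAIM (what is proved, stated in full; the proofs are below) =====
def Claim_equal_build_state_str : Prop := ∀ (lanes : List String), Dom_build_state_str lanes → Spec_build_state_str lanes (build_state_str lanes)

-- ===== LEMMAS AND PROOFS =====

-- painting the classification of `lanes` is a single map over `lanes`
lemma bss_paint_flags (lanes : List String) (w_to s_to : Char) :
    bss_paint (bss_flags lanes) w_to s_to
      = String.ofList (lanes.map (fun lane =>
          if PySem.Str.startswith lane "3T2_W2C" || PySem.Str.startswith lane "3T2_E2C"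
          then w_to else s_to)) := by
  unfold bss_paint bss_flags
  rw [List.map_map]
  congr 1
  apply List.map_congr_left
  intro lane _
  cases hW : PySem.Chars.startswith lane.toList ['3', 'T', '2', '_', 'W', '2', 'C'] <;>
    cases hE : PySem.Chars.startswith lane.toList ['3', 'T', '2', '_', 'E', '2', 'C'] <;>
      simp [hW, hE]

lemma bss_step_append (s : String) (c : Char) (cs : List Char) :
    (s ++ String.ofList [c]) ++ String.ofList cs = s ++ String.ofList (c :: cs) := by
  rw [String.append_assoc, ← String.ofList_append]; rfl

-- the fold of A, from arbitrary accumulators, appends exactly B's four painted strings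
lemma bss_fold_eq (lanes : List String) (wg sg wy sy : String) :
    lanes.foldl
      (fun (st : String × String × String × String) lane =>
        if PySem.Str.startswith lane "3T2_W2C" || PySem.Str.startswith lane "3T2_E2C" then
          (st.1 ++ "g", st.2.1 ++ "r", st.2.2.1 ++ "y", st.2.2.2 ++ "r")
        else
          (st.1 ++ "r", st.2.1 ++ "g", st.2.2.1 ++ "r", st.2.2.2 ++ "y"))
      (wg, sg, wy, sy)
    = (wg ++ bss_paint (bss_flags lanes) 'g' 'r',
       sg ++ bss_paint (bss_flags lanes) 'r' 'g',
       wy ++ bss_paint (bss_flags lanes) 'y' 'r',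
       sy ++ bss_paint (bss_flags lanes) 'r' 'y') := by
  induction lanes generalizing wg sg wy sy with
  | nil =>
      simp [bss_paint_flags]
  | cons l rest ih =>
      simp only [List.foldl_cons]
      by_cases h : (PySem.Str.startswith l "3T2_W2C" || PySem.Str.startswith l "3T2_E2C") = true
      · rw [if_pos h, ih]
        simp only [bss_paint_flags, List.map_cons, h, if_true,
          show ("g" : String) = String.ofList ['g'] from rfl,
          show ("r" : String) = String.ofList ['r'] from rfl,
          show ("y" : String) = String.ofList ['y'] from rfl,
          bss_step_append]
      · rw [if_neg h, ih]
        rw [Bool.not_eq_true] at h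
        simp only [bss_paint_flags, List.map_cons, h,
          show ("g" : String) = String.ofList ['g'] from rfl,
          show ("r" : String) = String.ofList ['r'] from rfl,
          show ("y" : String) = String.ofList ['y'] from rfl,
          bss_step_append]
        simp

-- ===== VERDICT (by name: the statement is the Claim_ definition above) =====
theorem build_state_str_spec : Claim_equal_build_state_str := by
  intro lanes _
  unfold Spec_build_state_str build_state_str build_state_str_alt
  rw [bss_fold_eq]
  rfl
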